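-- pv_equiv track=rewrite | github.com/Susmitha-J/Database-Normalizer | Normalization.py | simulate_natural_join
-- ===== SOURCE A (Python) =====
-- def simulate_natural_join(data_1, data_2, subset, complement_set):
--     """
--     Simulate a natural join between two datasets based on join attributes.
--
--     Parameters:
--         data_1 (list): Data extracted from the first subset.
--         data_2 (list): Data extracted from the complement subset.
--         subset (list): Attributes used in the first dataset.
--         complement_set (list): Attributes used in the second dataset.
--
--     Returns:
--         list: Resulting joined dataset.
--     """
--     joined_data = []
--
--     for row1 in data_1:
--         for row2 in data_2:
--             # Match on overlapping attributes (intersecting columns)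
--             join_attributes = list(set(subset).intersection(complement_set))
--             if all(row1[subset.index(attr)] == row2[complement_set.index(attr)] for attr in join_attributes):
--                 # Combine rows ensuring no duplicates
--                 combined_row = row1 + [row2[complement_set.index(attr)] for attr in complement_set if attr not in join_attributes]
--                 joined_data.append(combined_row)
--
--     return joined_data
-- ===== SOURCE B (Python) =====
-- def simulate_natural_join(data_1, data_2, subset, complement_set):
--     """Hash join: index data_2 by its join-key tuple once, then probe per row of data_1."""
--     sub_pos = {}
--     for i, a in enumerate(subset):
--         if a not in sub_pos:
--             sub_pos[a] = i
--     comp_pos = {}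
--     for i, a in enumerate(complement_set):
--         if a not in comp_pos:
--             comp_pos[a] = i
--     join_attrs = [a for a in sub_pos if a in comp_pos]
--     join_set = set(join_attrs)
--     extra_idx = [comp_pos[a] for a in complement_set if a not in join_set]
--     index = {}
--     for row2 in data_2:
--         key = tuple(row2[comp_pos[a]] for a in join_attrs)
--         index.setdefault(key, []).append([row2[i] for i in extra_idx])
--     out = []
--     for row1 in data_1:
--         key = tuple(row1[sub_pos[a]] for a in join_attrs)
--         for extras in index.get(key, ()):
--             out.append(row1 + extras)
--     return out
-- ===== Notes on version B (the rewrite author's own statement) =====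
-- stated objective: faster
-- what changed: Replaces A's nested loop (which rebuilds the join-attribute set and rescans subset/complement_set with list.index for every row pair) by a hash join: first-occurrence position dicts are built once, data_2 is indexed by its join-key tuple preserving order, and each row of data_1 probes that index.
-- outside the precondition, e.g. on simulate_natural_join([['x']], [], ['a', 'b'], ['a', 'b']): A returns [], B raises IndexError; on simulate_natural_join([], [['1']], [], ['a', 'b']): A returns [], B raises IndexError
import Mathlib
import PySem

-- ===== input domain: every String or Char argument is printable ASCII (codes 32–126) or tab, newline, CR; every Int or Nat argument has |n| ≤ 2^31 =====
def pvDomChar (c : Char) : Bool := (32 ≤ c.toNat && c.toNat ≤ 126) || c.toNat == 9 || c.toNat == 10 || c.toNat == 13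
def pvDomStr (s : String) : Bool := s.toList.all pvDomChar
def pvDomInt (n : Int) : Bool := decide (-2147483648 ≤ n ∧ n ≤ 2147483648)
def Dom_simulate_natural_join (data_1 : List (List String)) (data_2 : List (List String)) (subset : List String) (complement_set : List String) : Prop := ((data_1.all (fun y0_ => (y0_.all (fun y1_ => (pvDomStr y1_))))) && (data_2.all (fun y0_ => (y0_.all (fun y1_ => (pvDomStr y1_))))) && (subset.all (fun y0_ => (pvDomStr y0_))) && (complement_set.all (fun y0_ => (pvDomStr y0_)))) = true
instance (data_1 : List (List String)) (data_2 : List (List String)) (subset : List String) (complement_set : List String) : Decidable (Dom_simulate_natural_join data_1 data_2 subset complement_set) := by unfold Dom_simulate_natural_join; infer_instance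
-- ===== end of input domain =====

-- B replaces A's nested O(n·m·k) scan by a hash join (index data_2 by its join-key once, probe per row of data_1): objective faster, same return value on Pre_.

-- ===== PORT A =====
-- Python A; set(subset).intersection(complement_set) is consumed only order-insensitively
-- (all(), membership), so PySem.Set.inter is exact here.  .index(attr) is only called with
-- attr a member of the list, so it never raises and equals (index? _ _).getD 0; row indexing
-- is in range under Pre_, where pyGetD never returns its default.
def simulate_natural_join (data_1 : List (List String)) (data_2 : List (List String)) (subset : List String) (complement_set : List String) : List (List String) :=
  data_1.foldl (fun joined_data row1 =>
    data_2.foldl (fun joined_data row2 =>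
      let join_attributes : List String := PySem.Set.inter (PySem.Set.ofList subset) complement_set
      if join_attributes.all (fun attr =>
            PySem.List.pyGetD row1 (((PySem.List.index? subset attr).getD 0 : Nat) : Int) "" ==
            PySem.List.pyGetD row2 (((PySem.List.index? complement_set attr).getD 0 : Nat) : Int) "")
      then joined_data ++ [row1 ++ ((complement_set.filter (fun attr => !(join_attributes.contains attr))).map
             (fun attr => PySem.List.pyGetD row2 (((PySem.List.index? complement_set attr).getD 0 : Nat) : Int) ""))]
      else joined_data) joined_data) []

-- ===== PORT B =====
-- first-occurrence position dictionary: {} filled by 'for i, a in enumerate(attrs): if a not in pos: pos[a] = i'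
def pvFirstPos (attrs : List String) : PySem.Dict String Int :=
  (PySem.List.enumerate attrs 0).foldl (fun d p => if d.contains p.2 then d else d.insert p.2 p.1) PySem.Dict.empty

-- Python B (hash join); dict iteration '[a for a in sub_pos if a in comp_pos]' is keys in
-- insertion order; tuple keys become List String keys; 'index.setdefault(key, []).append(v)'
-- is 'modify key [] (· ++ [v])'; 'index.get(key, ())' is 'getD key []'.
def simulate_natural_join_alt (data_1 : List (List String)) (data_2 : List (List String)) (subset : List String) (complement_set : List String) : List (List String) :=
  let sub_pos := pvFirstPos subset
  let comp_pos := pvFirstPos complement_set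
  let join_attrs := sub_pos.keys.filter (fun a => comp_pos.contains a)
  let join_set : PySem.Set String := PySem.Set.ofList join_attrs
  let extra_idx := (complement_set.filter (fun a => !(join_set.contains a))).map (fun a => comp_pos.getD a 0)
  let index := data_2.foldl (fun d row2 =>
      d.modify (join_attrs.map (fun a => PySem.List.pyGetD row2 (comp_pos.getD a 0) "")) []
        (fun l => l ++ [extra_idx.map (fun i => PySem.List.pyGetD row2 i "")])) PySem.Dict.empty
  data_1.foldl (fun out row1 =>
    (index.getD (join_attrs.map (fun a => PySem.List.pyGetD row1 (sub_pos.getD a 0) "")) []).foldl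
      (fun out extras => out ++ [row1 ++ extras]) out) []

-- ===== PRECONDITION & SPEC =====
-- Pre_ excludes inputs where a row is too short for a first position that is actually indexed
-- (the subset/complement position of a shared attribute, and the complement position of a
-- non-shared attribute): there Python A can raise IndexError (and when A's short-circuit
-- happens to return anyway, so can B).
def Pre_simulate_natural_join (data_1 : List (List String)) (data_2 : List (List String)) (subset : List String) (complement_set : List String) : Prop :=
  (∀ a ∈ subset, a ∈ complement_set →
      (∀ r ∈ data_1, List.idxOf a subset < r.length) ∧
      (∀ r ∈ data_2, List.idxOf a complement_set < r.length)) ∧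
  (∀ a ∈ complement_set, a ∉ subset → ∀ r ∈ data_2, List.idxOf a complement_set < r.length)
instance (data_1 : List (List String)) (data_2 : List (List String)) (subset : List String) (complement_set : List String) : Decidable (Pre_simulate_natural_join data_1 data_2 subset complement_set) := by unfold Pre_simulate_natural_join; infer_instance

def pvWitness_simulate_natural_join : List (List String) × List (List String) × List String × List String :=
  ([["1", "u"]], [["1", "v"]], ["a", "b"], ["a", "c"])

def Spec_simulate_natural_join (data_1 : List (List String)) (data_2 : List (List String)) (subset : List String) (complement_set : List String) (out : List (List String)) : Prop := out = simulate_natural_join_alt data_1 data_2 subset complement_set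
instance (data_1 : List (List String)) (data_2 : List (List String)) (subset : List String) (complement_set : List String) (out : List (List String)) : Decidable (Spec_simulate_natural_join data_1 data_2 subset complement_set out) := by unfold Spec_simulate_natural_join; infer_instance

-- ===== CLAIM (what is proved, stated in full; the proofs are below) =====
def Claim_equal_simulate_natural_join : Prop := ∀ (data_1 : List (List String)) (data_2 : List (List String)) (subset : List String) (complement_set : List String), Dom_simulate_natural_join data_1 data_2 subset complement_set → Pre_simulate_natural_join data_1 data_2 subset complement_set → Spec_simulate_natural_join data_1 data_2 subset complement_set (simulate_natural_join data_1 data_2 subset complement_set)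

-- ===== LEMMAS AND PROOFS =====

lemma pv_beq_comm {α : Type} [BEq α] [LawfulBEq α] (a b : α) : (a == b) = (b == a) := by
  by_cases h : a = b
  · simp [h]
  · simp [h, Ne.symm h]

lemma pv_dict_contains_eq_keys_contains {κ ν : Type} [BEq κ] [LawfulBEq κ] (d : PySem.Dict κ ν) (k : κ) :
    d.contains k = d.keys.contains k := by
  rw [List.contains_eq_mem, Bool.eq_iff_iff]
  simp [PySem.Dict.contains_iff_mem_keys]

lemma pv_ofList_contains {α : Type} [BEq α] [LawfulBEq α] (l : List α) (a : α) :
    PySem.Set.contains (PySem.Set.ofList l) a = l.contains a := by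
  show List.contains _ _ = _
  rw [List.contains_eq_mem, List.contains_eq_mem]
  simp [PySem.Set.mem_ofList]

lemma pvFirstPos_get?_aux (l : List String) (s : Int) (d : PySem.Dict String Int) (a : String) :
    ((PySem.List.enumerate l s).foldl (fun d p => if d.contains p.2 then d else d.insert p.2 p.1) d).get? a
      = if d.contains a then d.get? a else (PySem.List.index? l a).map (fun k => s + (k : Int)) := by
  induction l generalizing s d with
  | nil =>
    simp [PySem.List.enumerate, PySem.List.index?]
    intro h
    rw [PySem.Dict.contains_eq_isSome_get?] at h
    exact Option.eq_none_iff_forall_ne_some.mpr (fun v hv => by simp [hv] at h)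
  | cons x xs ih =>
    rw [PySem.List.enumerate_cons]
    simp only [List.foldl_cons]
    by_cases hx : d.contains x = true
    · rw [if_pos hx, ih]
      by_cases ha : d.contains a = true
      · simp [ha]
      · have hne : x ≠ a := fun e => by subst e; rw [hx] at ha; exact ha rfl
        rw [if_neg ha, if_neg ha, PySem.List.index?_cons_of_ne xs hne]
        cases PySem.List.index? xs a with
        | none => simp
        | some k => simp; ring
    · rw [if_neg hx, ih]
      rw [PySem.Dict.contains_insert, PySem.Dict.get?_insert]
      by_cases hax : a = x
      · subst hax
        rw [if_neg hx, PySem.List.index?_cons_self]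
        simp
      · have hne : x ≠ a := fun e => hax e.symm
        have hbeq : (a == x) = false := by simp [hax]
        by_cases ha : d.contains a = true
        · simp [ha, hax]
        · have ha' : d.contains a = false := by simpa using ha
          rw [if_neg ha, PySem.List.index?_cons_of_ne xs hne]
          simp only [hbeq, ha', Bool.or_false]
          cases PySem.List.index? xs a with
          | none => simp
          | some k => simp; ring

lemma pvFirstPos_get? (l : List String) (a : String) :
    (pvFirstPos l).get? a = (PySem.List.index? l a).map (fun k => (k : Int)) := by
  unfold pvFirstPos
  rw [pvFirstPos_get?_aux]
  simp [PySem.Dict.contains_empty]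

lemma pvFirstPos_contains (l : List String) (a : String) :
    (pvFirstPos l).contains a = l.contains a := by
  rw [PySem.Dict.contains_eq_isSome_get?, pvFirstPos_get?, List.contains_eq_mem, Bool.eq_iff_iff]
  have h := PySem.List.index?_isSome_iff l a
  cases hi : PySem.List.index? l a with
  | none => rw [hi] at h; simp at h; simp [h]
  | some k => rw [hi] at h; simp at h; simp [h]

lemma pvFirstPos_getD (l : List String) (a : String) :
    (pvFirstPos l).getD a 0 = (((PySem.List.index? l a).getD 0 : Nat) : Int) := by
  rw [PySem.Dict.getD_eq_get?_getD, pvFirstPos_get?]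
  cases h : PySem.List.index? l a <;> simp

lemma pvFirstPos_keys_aux (l : List String) (s : Int) (d : PySem.Dict String Int) :
    ((PySem.List.enumerate l s).foldl (fun d p => if d.contains p.2 then d else d.insert p.2 p.1) d).keys
      = PySem.Set.update d.keys l := by
  induction l generalizing s d with
  | nil => simp [PySem.List.enumerate, PySem.Set.update]
  | cons x xs ih =>
    rw [PySem.List.enumerate_cons]
    simp only [List.foldl_cons]
    rw [ih]
    have hupd : PySem.Set.update d.keys (x :: xs) = PySem.Set.update (PySem.Set.add d.keys x) xs := by
      simp [PySem.Set.update]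
    rw [hupd]
    by_cases hx : d.contains x = true
    · have hkc : d.keys.contains x = true := by
        rw [← pv_dict_contains_eq_keys_contains]; exact hx
      have hm : x ∈ d.keys := by simpa using hkc
      have hadd : PySem.Set.add d.keys x = d.keys := by
        simp [PySem.Set.add, PySem.Set.contains, hm]
      simp [hx, hadd]
    · have hkc : d.keys.contains x = false := by
        rw [← pv_dict_contains_eq_keys_contains]; simpa using hx
      have hk : (d.insert x s).keys = d.keys ++ [x] :=
        PySem.Dict.keys_insert_of_not_contains _ _ (by simpa using hx)
      have hm : x ∉ d.keys := by simpa using hkc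
      have hadd : PySem.Set.add d.keys x = d.keys ++ [x] := by
        simp [PySem.Set.add, PySem.Set.contains, hm]
      simp [hx, hk, hadd]

lemma pvFirstPos_keys (l : List String) : (pvFirstPos l).keys = PySem.Set.ofList l := by
  unfold pvFirstPos
  rw [pvFirstPos_keys_aux, PySem.Set.ofList_eq_foldl]
  simp [PySem.Set.update, PySem.Dict.keys_empty]

lemma pv_ja_eq (subset complement_set : List String) :
    (pvFirstPos subset).keys.filter (fun a => (pvFirstPos complement_set).contains a)
      = PySem.Set.inter (PySem.Set.ofList subset) complement_set := by
  rw [pvFirstPos_keys]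
  show _ = List.filter _ _
  apply List.filter_congr
  intro a _
  rw [pvFirstPos_contains]
  rfl

lemma pv_all_beq_eq (l : List String) (f g : String → String) :
    (l.all fun a => f a == g a) = (l.map f == l.map g) := by
  induction l with
  | nil => rfl
  | cons x xs ih =>
    simp only [List.all_cons, List.map_cons, ih]
    rfl

lemma pv_all_beq_eq' (l : List String) (f g : String → String) :
    (l.all fun a => f a == g a) = (l.map g == l.map f) := by
  rw [pv_all_beq_eq]; exact pv_beq_comm _ _

lemma pv_hash_join_getD {α κ β : Type} [BEq κ] [LawfulBEq κ] (d2 : List α) (k2 : α → κ) (e : α → β) (key : κ) :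
    (d2.foldl (fun d row2 => d.modify (k2 row2) [] (fun l => l ++ [e row2])) PySem.Dict.empty).getD key []
      = (d2.filter (fun r => k2 r == key)).map e := by
  have h1 : d2.foldl (fun d row2 => d.modify (k2 row2) [] (fun l => l ++ [e row2])) PySem.Dict.empty
      = (d2.map (fun r => (k2 r, e r))).foldl (fun d p => d.modify p.1 [] (fun l => l ++ [p.2])) PySem.Dict.empty := by
    rw [List.foldl_map]
  rw [h1, PySem.Dict.getD_foldl_modify_append, List.filter_map, List.map_map]
  simp [Function.comp_def, PySem.Dict.getD_empty]

-- ===== VERDICT (by name: the statement is the Claim_ definition above) =====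
theorem simulate_natural_join_spec : Claim_equal_simulate_natural_join := by
  intro d1 d2 sub comp _hDom _hPre
  unfold Spec_simulate_natural_join simulate_natural_join simulate_natural_join_alt
  simp only [pv_hash_join_getD, PySem.List.foldl_append_if, PySem.List.foldl_append_singleton_eq_map,
    pv_ja_eq, pv_ofList_contains, pvFirstPos_getD, List.map_map, Function.comp_def, pv_all_beq_eq']
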